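-- pv_equiv track=rewrite | github.com/AAAronB/Ferry | ferry.py | getFullestLaneWithCapacity
-- ===== SOURCE A (Python) =====
-- from typing import Dict, List
--
-- def laneLoad(lane: List[Dict[str, int]]) -> int:
--     return sum(vehicle["length"] for vehicle in lane)
--
-- def getFullestLaneWithCapacity(carLen, S, c):
--     # Return the index of the fullest lane with sufficient capacity for the vehicle.
--     # Return -1 if there is no suitable lane
--     fullestLane = -1
--     fullestLaneSum = -1  # Initialize to -1
--     for i in range(len(S)):
--         currentSum = laneLoad(S[i])
--         if currentSum + carLen <= c and currentSum > fullestLaneSum: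
--             fullestLane = i
--             fullestLaneSum = currentSum
--     return fullestLane
-- ===== SOURCE B (Python) =====
-- from typing import Dict, List
--
-- def laneLoad(lane):
--     return sum(vehicle["length"] for vehicle in lane)
--
-- def getFullestLaneWithCapacity(carLen, S, c):
--     # Sort-then-scan: order lanes by decreasing load (stable, so ties keep
--     # index order), then return the first lane in that order that still fits.
--     pairs = [(laneLoad(lane), i) for i, lane in enumerate(S)]
--     ordered = sorted(pairs, key=lambda p: -p[0])
--     for load, i in ordered:
--         if load + carLen <= c:
--             return i
--     return -1
-- ===== Notes on version B (the rewrite author's own statement) =====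
-- stated objective: alternative
-- what changed: Replaces A's fused single-pass running-argmax loop by a sort-then-scan algorithm: build (load, index) pairs, stably sort them by decreasing load (ties keep index order), and return the first pair in sorted order that still fits, or -1.
-- intended difference: When at least one lane fits the vehicle but every fitting lane has a strictly negative total load, A's sentinel initialisation fullestLaneSum=-1 makes it return -1 although a suitable lane exists, while B returns the index of the fullest fitting lane, which is the intended 'return -1 only if there is no suitable lane' behaviour. — e.g. on getFullestLaneWithCapacity(0, [[[("length", -1)]]], 5): A returns -1, B returns 0
import Mathlib
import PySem

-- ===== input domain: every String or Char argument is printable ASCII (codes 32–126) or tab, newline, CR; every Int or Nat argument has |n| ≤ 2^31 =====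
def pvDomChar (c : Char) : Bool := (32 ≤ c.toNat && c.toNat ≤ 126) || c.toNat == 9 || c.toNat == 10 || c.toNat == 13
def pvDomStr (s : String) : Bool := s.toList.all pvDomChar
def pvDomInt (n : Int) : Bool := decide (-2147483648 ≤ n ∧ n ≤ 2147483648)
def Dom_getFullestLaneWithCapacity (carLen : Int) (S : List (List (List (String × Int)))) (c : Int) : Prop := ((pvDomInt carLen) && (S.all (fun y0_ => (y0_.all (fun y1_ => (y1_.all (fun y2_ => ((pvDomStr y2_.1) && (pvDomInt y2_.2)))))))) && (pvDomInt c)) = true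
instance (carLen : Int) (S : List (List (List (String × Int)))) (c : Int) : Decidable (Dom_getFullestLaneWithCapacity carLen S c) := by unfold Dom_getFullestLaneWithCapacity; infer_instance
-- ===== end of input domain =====

-- B replaces A's fused single-pass argmax loop by sort-then-scan: it sorts the (load, index)
-- pairs by decreasing load (stable sort, so ties keep index order) and returns the first pair
-- in that order that still fits (objective: alternative); on inputs where every fitting lane has
-- strictly negative load, A's -1 sentinel returns -1 while B returns the fullest fitting lane (D_ below).

-- ===== PORT A =====
-- vehicle["length"]: KeyError (get? = none) is excluded by Pre_; the getD 0 default is unreachable there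
def laneLoad (lane : List (List (String × Int))) : Int :=
  lane.foldl (fun acc vehicle => acc + ((PySem.Dict.mk vehicle).get? "length").getD 0) 0

-- the 'for i in range(len(S))' loop of A, state (fullestLane, fullestLaneSum), S[i] consumed in order
def gflLoop (carLen c : Int) : List (List (List (String × Int))) → Int → Int → Int → Int
  | [], _, fullestLane, _ => fullestLane
  | lane :: rest, i, fullestLane, fullestLaneSum =>
    let currentSum := laneLoad lane
    if currentSum + carLen ≤ c ∧ fullestLaneSum < currentSum then
      gflLoop carLen c rest (i + 1) i currentSum
    else
      gflLoop carLen c rest (i + 1) fullestLane fullestLaneSum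

def getFullestLaneWithCapacity (carLen : Int) (S : List (List (List (String × Int)))) (c : Int) : Int :=
  gflLoop carLen c S 0 (-1) (-1)

-- ===== PORT B =====
-- Source B: pairs = [(laneLoad(lane), i) for i, lane in enumerate(S)];
--       ordered = sorted(pairs, key=lambda p: -p[0])   (stable);
--       first-match scan over ordered (ported as List.find?, the library first-match scan); else -1
def getFullestLaneWithCapacity_alt (carLen : Int) (S : List (List (List (String × Int)))) (c : Int) : Int :=
  let pairs := (PySem.List.enumerate S).map (fun p => (laneLoad p.2, p.1))
  let ordered := PySem.List.sorted pairs (fun p => -p.1)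
  match ordered.find? (fun p => decide (p.1 + carLen ≤ c)) with
  | some p => p.2
  | none => -1

-- ===== PRECONDITION & SPEC =====
-- Pre_ excludes vehicles without a "length" key (Python A raises KeyError there) and vehicles whose
-- association list has duplicate keys (impossible in a real Python dict; first-vs-last lookup on the
-- assoc-list encoding is accidental).
def Pre_getFullestLaneWithCapacity (carLen : Int) (S : List (List (List (String × Int)))) (c : Int) : Prop :=
  ∀ lane ∈ S, ∀ vehicle ∈ lane,
    (vehicle.map Prod.fst).Nodup ∧ "length" ∈ vehicle.map Prod.fst
instance (carLen : Int) (S : List (List (List (String × Int)))) (c : Int) : Decidable (Pre_getFullestLaneWithCapacity carLen S c) := by unfold Pre_getFullestLaneWithCapacity; infer_instance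

def pvWitness_getFullestLaneWithCapacity : Int × (List (List (List (String × Int)))) × Int :=
  (2, [[[("length", 3)]], [[("length", 1)], [("length", 4)]]], 10)

-- When at least one lane fits the vehicle but every fitting lane has strictly negative total load,
-- A's sentinel initialisation fullestLaneSum = -1 makes it return -1 although a suitable lane exists;
-- B returns the index of the fullest fitting lane, the intended 'no suitable lane ⇒ -1' behaviour.
def D_getFullestLaneWithCapacity (carLen : Int) (S : List (List (List (String × Int)))) (c : Int) : Prop :=
  (∃ lane ∈ S, laneLoad lane + carLen ≤ c) ∧
  (∀ lane ∈ S, laneLoad lane + carLen ≤ c → laneLoad lane < 0)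
instance (carLen : Int) (S : List (List (List (String × Int)))) (c : Int) : Decidable (D_getFullestLaneWithCapacity carLen S c) := by unfold D_getFullestLaneWithCapacity; infer_instance

def Spec_getFullestLaneWithCapacity (carLen : Int) (S : List (List (List (String × Int)))) (c : Int) (out : Int) : Prop := ¬ D_getFullestLaneWithCapacity carLen S c → out = getFullestLaneWithCapacity_alt carLen S c
instance (carLen : Int) (S : List (List (List (String × Int)))) (c : Int) (out : Int) : Decidable (Spec_getFullestLaneWithCapacity carLen S c out) := by unfold Spec_getFullestLaneWithCapacity; infer_instance

def pvDiffWitness_getFullestLaneWithCapacity : Int × (List (List (List (String × Int)))) × Int :=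
  (0, [[[("length", -1)]]], 5)
def pvDiffWitnessOut_getFullestLaneWithCapacity : Int × Int := (-1, 0)

-- ===== CLAIM (what is proved, stated in full; the proofs are below) =====
def Claim_unchanged_getFullestLaneWithCapacity : Prop := ∀ (carLen : Int) (S : List (List (List (String × Int)))) (c : Int), Dom_getFullestLaneWithCapacity carLen S c → Pre_getFullestLaneWithCapacity carLen S c → Spec_getFullestLaneWithCapacity carLen S c (getFullestLaneWithCapacity carLen S c)
def Claim_changed_getFullestLaneWithCapacity : Prop := Dom_getFullestLaneWithCapacity (pvDiffWitness_getFullestLaneWithCapacity.1) (pvDiffWitness_getFullestLaneWithCapacity.2.1) (pvDiffWitness_getFullestLaneWithCapacity.2.2) ∧ Pre_getFullestLaneWithCapacity (pvDiffWitness_getFullestLaneWithCapacity.1) (pvDiffWitness_getFullestLaneWithCapacity.2.1) (pvDiffWitness_getFullestLaneWithCapacity.2.2) ∧ D_getFullestLaneWithCapacity (pvDiffWitness_getFullestLaneWithCapacity.1) (pvDiffWitness_getFullestLaneWithCapacity.2.1) (pvDiffWitness_getFullestLaneWithCapacity.2.2) ∧ getFullestLaneWithCapacity (pvDiffWitness_getFullestLaneWithCapacity.1)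 (pvDiffWitness_getFullestLaneWithCapacity.2.1) (pvDiffWitness_getFullestLaneWithCapacity.2.2) = pvDiffWitnessOut_getFullestLaneWithCapacity.1 ∧ getFullestLaneWithCapacity_alt (pvDiffWitness_getFullestLaneWithCapacity.1) (pvDiffWitness_getFullestLaneWithCapacity.2.1) (pvDiffWitness_getFullestLaneWithCapacity.2.2) = pvDiffWitnessOut_getFullestLaneWithCapacity.2 ∧ pvDiffWitnessOut_getFullestLaneWithCapacity.1 ≠ pvDiffWitnessOut_getFullestLaneWithCapacity.2
def Claim_exact_getFullestLaneWithCapacity : Prop := ∀ (carLen : Int) (S : List (List (List (String × Int)))) (c : Int), Dom_getFullestLaneWithCapacity carLen S c → Pre_getFullestLaneWithCapacity carLen S c → D_getFullestLaneWithCapacity carLen S c → getFullestLaneWithCapacity carLen S c ≠ getFullestLaneWithCapacity_alt carLen S c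

-- ===== LEMMAS AND PROOFS =====

-- the eligibility test of both programs, and the argmax step A's loop folds with
def pvFit (carLen c : Int) (p : Int × Int) : Bool := decide (p.1 + carLen ≤ c)

def pvStep (acc : Option (Int × Int)) (x : Int × Int) : Option (Int × Int) :=
  match acc with
  | none => some x
  | some m => if m.1 < x.1 then some x else some m

-- the (load, index) pairs B builds, started at index i, and the fitting ones among them
def pvPairs (S : List (List (List (String × Int)))) (i : Int) : List (Int × Int) :=
  (PySem.List.enumerate S i).map (fun p => (laneLoad p.2, p.1))

def pvCand (carLen c : Int) (S : List (List (List (String × Int)))) (i : Int) : List (Int × Int) :=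
  (pvPairs S i).filter (pvFit carLen c)

theorem pvCand_cons (carLen c : Int) (lane : List (List (String × Int)))
    (rest : List (List (List (String × Int)))) (i : Int) :
    pvCand carLen c (lane :: rest) i =
      if laneLoad lane + carLen ≤ c then (laneLoad lane, i) :: pvCand carLen c rest (i + 1)
      else pvCand carLen c rest (i + 1) := by
  by_cases h : laneLoad lane + carLen ≤ c <;>
    simp [pvCand, pvPairs, pvFit, PySem.List.enumerate_cons, h]

theorem foldl_pvStep_isSome (l : List (Int × Int)) :
    ∀ m : Int × Int, ∃ t, l.foldl pvStep (some m) = some t := by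
  induction l with
  | nil => intro m; exact ⟨m, rfl⟩
  | cons x l ih =>
    intro m
    rw [List.foldl_cons]
    by_cases h : m.1 < x.1
    · rw [show pvStep (some m) x = some x from by simp [pvStep, h]]; exact ih x
    · rw [show pvStep (some m) x = some m from by simp [pvStep, h]]; exact ih m

theorem gflLoop_eq (carLen c : Int) (S : List (List (List (String × Int)))) :
    ∀ (i fl fs : Int),
      gflLoop carLen c S i fl fs =
        (match (pvCand carLen c S i).foldl pvStep (some (fs, fl)) with
         | none => fl
         | some t => t.2) := by
  induction S with
  | nil => intro i fl fs; simp [gflLoop, pvCand, pvPairs, PySem.List.enumerate_nil]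
  | cons lane rest ih =>
    intro i fl fs
    rw [pvCand_cons]
    by_cases helig : laneLoad lane + carLen ≤ c
    · rw [if_pos helig, List.foldl_cons]
      by_cases h2 : fs < laneLoad lane
      · rw [show pvStep (some (fs, fl)) (laneLoad lane, i) = some (laneLoad lane, i) from by
          simp [pvStep, h2]]
        rw [show gflLoop carLen c (lane :: rest) i fl fs =
            gflLoop carLen c rest (i + 1) i (laneLoad lane) from by simp [gflLoop, helig, h2]]
        rw [ih (i + 1) i (laneLoad lane)]
        obtain ⟨t, ht⟩ := foldl_pvStep_isSome (pvCand carLen c rest (i + 1)) (laneLoad lane, i)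
        rw [ht]
      · rw [show pvStep (some (fs, fl)) (laneLoad lane, i) = some (fs, fl) from by
          simp [pvStep, h2]]
        rw [show gflLoop carLen c (lane :: rest) i fl fs =
            gflLoop carLen c rest (i + 1) fl fs from by simp [gflLoop, helig, h2]]
        exact ih (i + 1) fl fs
    · rw [if_neg helig]
      rw [show gflLoop carLen c (lane :: rest) i fl fs =
          gflLoop carLen c rest (i + 1) fl fs from by simp [gflLoop, helig]]
      exact ih (i + 1) fl fs

theorem foldl_pvStep_some (l : List (Int × Int)) :
    ∀ (m : Int × Int),
      l.foldl pvStep (some m) =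
        (match l.foldl pvStep none with
         | none => some m
         | some t => if m.1 < t.1 then some t else some m) := by
  induction l with
  | nil => intro m; rfl
  | cons x l ih =>
    intro m
    rw [List.foldl_cons, List.foldl_cons,
      show pvStep none x = some x from rfl]
    by_cases h : m.1 < x.1
    · rw [show pvStep (some m) x = some x from by simp [pvStep, h], ih x]
      cases hF : l.foldl pvStep none with
      | none => simp [h]
      | some t =>
        dsimp only
        by_cases hxt : x.1 < t.1
        · rw [if_pos hxt]; dsimp only; rw [if_pos (show m.1 < t.1 by omega)]
        · rw [if_neg hxt]; dsimp only; rw [if_pos h]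
    · rw [show pvStep (some m) x = some m from by simp [pvStep, h], ih m, ih x]
      cases hF : l.foldl pvStep none with
      | none => simp [h]
      | some t =>
        dsimp only
        by_cases hxt : x.1 < t.1
        · rw [if_pos hxt]
        · rw [if_neg hxt]; dsimp only
          rw [if_neg h, if_neg (show ¬ m.1 < t.1 by omega)]

theorem max?_eq_foldl (l : List (Int × Int)) :
    PySem.List.max? l (fun t => t.1) = l.foldl pvStep none := by
  unfold PySem.List.max?
  congr 1
  funext acc x
  cases acc <;> rfl

theorem portA_char (carLen c : Int) (S : List (List (List (String × Int)))) :
    getFullestLaneWithCapacity carLen S c =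
      (match (pvCand carLen c S 0).foldl pvStep none with
       | none => -1
       | some t => if (-1 : Int) < t.1 then t.2 else -1) := by
  rw [show getFullestLaneWithCapacity carLen S c = gflLoop carLen c S 0 (-1) (-1) from rfl,
    gflLoop_eq, foldl_pvStep_some]
  cases hF : (pvCand carLen c S 0).foldl pvStep none with
  | none => rfl
  | some t => by_cases h : (-1 : Int) < t.1 <;> simp [h]

-- B's side: inserting a non-fitting pair never changes the first fitting pair
theorem find?_insertBy_of_not_fit (carLen c : Int) (x : Int × Int)
    (hx : pvFit carLen c x = false) (s : List (Int × Int)) :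
    (PySem.List.insertBy (fun a b => decide (-a.1 < -b.1)) x s).find? (pvFit carLen c)
      = s.find? (pvFit carLen c) := by
  induction s with
  | nil => simp [PySem.List.insertBy, List.find?, hx]
  | cons y ys ih =>
    by_cases hb : (-x.1 : Int) < -y.1
    · rw [show PySem.List.insertBy (fun a b => decide (-a.1 < -b.1)) x (y :: ys)
          = x :: y :: ys from by simp [PySem.List.insertBy, hb]]
      simp [List.find?_cons, hx]
    · rw [show PySem.List.insertBy (fun a b => decide (-a.1 < -b.1)) x (y :: ys)
          = y :: PySem.List.insertBy (fun a b => decide (-a.1 < -b.1)) x ys from by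
        simp [PySem.List.insertBy, hb]]
      cases hy : pvFit carLen c y with
      | true => simp [hy]
      | false => simp only [List.find?_cons, hy]; exact ih

-- stable insertion of a fitting pair into a load-descending list IS A's argmax step
theorem find?_insertBy_of_fit (carLen c : Int) (x : Int × Int)
    (hx : pvFit carLen c x = true) (s : List (Int × Int))
    (hs : s.Pairwise (fun a b => b.1 ≤ a.1)) :
    (PySem.List.insertBy (fun a b => decide (-a.1 < -b.1)) x s).find? (pvFit carLen c)
      = pvStep (s.find? (pvFit carLen c)) x := by
  induction s with
  | nil => simp [PySem.List.insertBy, List.find?, hx, pvStep]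
  | cons y ys ih =>
    have hys : ys.Pairwise (fun a b => b.1 ≤ a.1) := hs.tail
    have hyall : ∀ u ∈ ys, u.1 ≤ y.1 := fun u hu => (List.pairwise_cons.mp hs).1 u hu
    by_cases hb : (-x.1 : Int) < -y.1
    · rw [show PySem.List.insertBy (fun a b => decide (-a.1 < -b.1)) x (y :: ys)
          = x :: y :: ys from by simp [PySem.List.insertBy, hb]]
      rw [show (x :: y :: ys).find? (pvFit carLen c) = some x from by simp [hx]]
      cases hf : (y :: ys).find? (pvFit carLen c) with
      | none => simp [pvStep]
      | some u =>
        have hu : u ∈ y :: ys := List.mem_of_find?_eq_some hf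
        have hle : u.1 ≤ y.1 := by
          rcases List.mem_cons.mp hu with h | h
          · rw [h]
          · exact hyall u h
        simp [pvStep, show u.1 < x.1 by omega]
    · rw [show PySem.List.insertBy (fun a b => decide (-a.1 < -b.1)) x (y :: ys)
          = y :: PySem.List.insertBy (fun a b => decide (-a.1 < -b.1)) x ys from by
        simp [PySem.List.insertBy, hb]]
      cases hy : pvFit carLen c y with
      | true => simp [hy, pvStep, show ¬y.1 < x.1 by omega]
      | false => simp only [List.find?_cons, hy]; exact ih hys

-- the scan over the sorted pairs computes A's running argmax over the fitting pairs
theorem find?_sorted_eq (carLen c : Int) (P : List (Int × Int)) :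
    (PySem.List.sorted P (fun p => -p.1)).find? (pvFit carLen c)
      = (P.filter (pvFit carLen c)).foldl pvStep none := by
  induction P using List.reverseRecOn with
  | nil => rfl
  | append_singleton P x ih =>
    have hins : PySem.List.sorted (P ++ [x]) (fun p => -p.1)
        = PySem.List.insertBy (fun a b => decide (-a.1 < -b.1)) x
            (PySem.List.sorted P (fun p => -p.1)) := by
      rw [PySem.List.sorted_eq_foldl_insertBy, PySem.List.sorted_eq_foldl_insertBy,
        List.foldl_append]
      rfl
    have hpw : (PySem.List.sorted P (fun p => -p.1)).Pairwise (fun a b => b.1 ≤ a.1) :=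
      (PySem.List.sorted_pairwise P (fun p => -p.1)).imp (by intro a b h; omega)
    rw [hins, List.filter_append, List.foldl_append]
    cases hx : pvFit carLen c x with
    | false =>
      rw [find?_insertBy_of_not_fit carLen c x hx, ih]
      simp [hx]
    | true =>
      rw [find?_insertBy_of_fit carLen c x hx _ hpw, ih]
      simp [hx]

theorem portB_char (carLen c : Int) (S : List (List (List (String × Int)))) :
    getFullestLaneWithCapacity_alt carLen S c =
      (match (pvCand carLen c S 0).foldl pvStep none with
       | none => -1
       | some t => t.2) := by
  rw [show getFullestLaneWithCapacity_alt carLen S c =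
      (match (PySem.List.sorted (pvPairs S 0) (fun p => -p.1)).find? (pvFit carLen c) with
       | some p => p.2
       | none => -1) from rfl, find?_sorted_eq]
  rw [show pvCand carLen c S 0 = (pvPairs S 0).filter (pvFit carLen c) from rfl]
  cases (pvPairs S 0).filter (pvFit carLen c) |>.foldl pvStep none <;> rfl

theorem mem_pvCand_of (carLen c : Int) (S : List (List (List (String × Int))))
    (lane : List (List (String × Int))) (h : lane ∈ S) (helig : laneLoad lane + carLen ≤ c) :
    ∃ j : Int, (laneLoad lane, j) ∈ pvCand carLen c S 0 := by
  obtain ⟨k, hk, hEq⟩ := List.mem_iff_getElem.mp h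
  refine ⟨(0 : Int) + k, ?_⟩
  simp only [pvCand, pvPairs, List.mem_filter, List.mem_map]
  refine ⟨⟨((0 : Int) + k, lane), ?_, rfl⟩, by simp [pvFit, helig]⟩
  rw [PySem.List.mem_enumerate_iff]
  exact ⟨k, hk, by rw [hEq]⟩

theorem pvCand_mem_shape (carLen c : Int) (S : List (List (List (String × Int))))
    (t : Int × Int) (h : t ∈ pvCand carLen c S 0) :
    0 ≤ t.2 ∧ ∃ lane ∈ S, t.1 = laneLoad lane ∧ laneLoad lane + carLen ≤ c := by
  simp only [pvCand, pvPairs, List.mem_filter, List.mem_map] at h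
  obtain ⟨⟨p, hmem, hEq⟩, hfit⟩ := h
  rw [PySem.List.mem_enumerate_iff] at hmem
  obtain ⟨k, hk, hp⟩ := hmem
  subst hp
  subst hEq
  simp only [pvFit, decide_eq_true_eq] at hfit
  exact ⟨by positivity, S[k], List.getElem_mem hk, rfl, hfit⟩

theorem max?_cand_pos (carLen c : Int) (S : List (List (List (String × Int)))) (t : Int × Int)
    (hF : (pvCand carLen c S 0).foldl pvStep none = some t)
    (lane : List (List (String × Int))) (h : lane ∈ S) (helig : laneLoad lane + carLen ≤ c) :
    laneLoad lane ≤ t.1 := by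
  obtain ⟨j, hj⟩ := mem_pvCand_of carLen c S lane h helig
  have := PySem.List.max?_isMax (by rw [max?_eq_foldl]; exact hF) _ hj
  simpa using this

-- ===== VERDICT (by name: the statement is the Claim_ definition above) =====
theorem getFullestLaneWithCapacity_spec : Claim_unchanged_getFullestLaneWithCapacity := by
  intro carLen S c _ _ hnd
  rw [portA_char, portB_char]
  cases hF : (pvCand carLen c S 0).foldl pvStep none with
  | none => rfl
  | some t =>
    have ht := pvCand_mem_shape carLen c S t
      (PySem.List.max?_mem (by rw [max?_eq_foldl]; exact hF))
    obtain ⟨-, lane0, hmem0, -, helig0⟩ := ht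
    unfold D_getFullestLaneWithCapacity at hnd
    rw [not_and_or] at hnd
    rcases hnd with hnd | hnd
    · exact absurd ⟨lane0, hmem0, helig0⟩ hnd
    · push Not at hnd
      obtain ⟨lane, hmem, helig, hpos⟩ := hnd
      have hle := max?_cand_pos carLen c S t hF lane hmem helig
      show (if (-1 : Int) < t.1 then t.2 else -1) = t.2
      rw [if_pos (show (-1 : Int) < t.1 by omega)]

theorem getFullestLaneWithCapacity_changed : Claim_changed_getFullestLaneWithCapacity := by
  unfold Claim_changed_getFullestLaneWithCapacity; decide

theorem getFullestLaneWithCapacity_tight : Claim_exact_getFullestLaneWithCapacity := by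
  intro carLen S c _ _ hD
  unfold D_getFullestLaneWithCapacity at hD
  obtain ⟨⟨lane, hmem, helig⟩, hall⟩ := hD
  rw [portA_char, portB_char]
  cases hF : (pvCand carLen c S 0).foldl pvStep none with
  | none =>
    obtain ⟨j, hj⟩ := mem_pvCand_of carLen c S lane hmem helig
    have : PySem.List.max? (pvCand carLen c S 0) (fun t => t.1) = none := by
      rw [max?_eq_foldl]; exact hF
    rw [PySem.List.max?_eq_none_iff] at this
    simp [this] at hj
  | some t =>
    obtain ⟨hj, lane1, hmem1, hval, helig1⟩ := pvCand_mem_shape carLen c S t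
      (PySem.List.max?_mem (by rw [max?_eq_foldl]; exact hF))
    have hneg : t.1 < 0 := hval ▸ hall lane1 hmem1 helig1
    show (if (-1 : Int) < t.1 then t.2 else -1) ≠ t.2
    rw [if_neg (show ¬ (-1 : Int) < t.1 by omega)]
    omega
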